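-- pv_equiv track=rewrite | github.com/michaelbironneau/rotary | main.py | get_mvsa_one_shift_at_a_time_constraints
-- ===== SOURCE A (Python) =====
-- def ix(museum_ix, mvsas_ix, day_ix, p_len, d_len):
--     """Return the index of the variable list represented by the composite indexes"""
--     return day_ix + (d_len)*(mvsas_ix + (p_len)*(museum_ix))
--
-- def get_mvsa_one_shift_at_a_time_constraints(museums, mvsas, days):
--     """MVSA can only be in one place at a time"""
--     constraints = []
--     constraint_b = []
--     for mvsa_ix, _ in enumerate(mvsas):
--         for day_ix, _ in enumerate(days):
--             constraints.append([0]*len(mvsas)*len(museums)*len(days))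
--             constraint_b.append(1)
--             for museum_ix, _ in enumerate(museums):
--                 constraints[len(constraints)-1][ix(museum_ix, mvsa_ix, day_ix, len(mvsas), len(days))] = 1
--     return (constraints, constraint_b)
-- ===== SOURCE B (Python) =====
-- def get_mvsa_one_shift_at_a_time_constraints(museums, mvsas, days):
--     """MVSA can only be in one place at a time.
--
--     The constraint matrix is the (V*D)x(V*D) identity tiled len(museums) times
--     horizontally: row i is len(museums) copies of the i-th standard basis vector
--     of dimension V*D, built by concatenation (no index arithmetic, no per-cell
--     conditional)."""
--     n = len(mvsas) * len(days)
--     reps = len(museums)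
--     rows = [([0] * i + [1] + [0] * (n - 1 - i)) * reps for i in range(n)]
--     return (rows, [1] * n)
-- ===== Notes on version B (the rewrite author's own statement) =====
-- stated objective: alternative
-- what changed: B replaces A's triple loop with ix arithmetic and in-place pokes by an identity-tiling construction: the matrix is the (V*D)x(V*D) identity tiled len(museums) times horizontally, each row built by concatenating zero-runs around a single 1.
import Mathlib
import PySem

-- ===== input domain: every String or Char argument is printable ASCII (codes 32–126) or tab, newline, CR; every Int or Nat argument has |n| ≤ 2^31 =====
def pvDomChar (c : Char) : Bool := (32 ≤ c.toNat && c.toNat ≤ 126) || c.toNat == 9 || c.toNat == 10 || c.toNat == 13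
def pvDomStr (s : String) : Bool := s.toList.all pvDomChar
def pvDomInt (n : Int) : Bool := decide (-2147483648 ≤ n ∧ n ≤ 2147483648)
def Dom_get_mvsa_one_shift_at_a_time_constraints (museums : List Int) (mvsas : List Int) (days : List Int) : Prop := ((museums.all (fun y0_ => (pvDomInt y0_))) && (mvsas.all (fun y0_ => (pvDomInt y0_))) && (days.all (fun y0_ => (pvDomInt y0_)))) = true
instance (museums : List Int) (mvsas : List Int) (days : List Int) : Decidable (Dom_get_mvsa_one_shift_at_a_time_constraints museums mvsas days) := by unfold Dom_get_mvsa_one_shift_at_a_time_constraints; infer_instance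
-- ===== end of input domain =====

-- B replaces A's triple loop with ix arithmetic and in-place pokes by an identity-tiling
-- construction: the matrix is the (V*D)×(V*D) identity tiled len(museums) times horizontally,
-- each row built by concatenating zero-runs around a single 1 (alternative decomposition).

-- ===== PORT A =====
def ixF (museum_ix mvsas_ix day_ix p_len d_len : Int) : Int :=
  day_ix + d_len * (mvsas_ix + p_len * museum_ix)

def get_mvsa_one_shift_at_a_time_constraints (museums : List Int) (mvsas : List Int) (days : List Int) :
    List (List Int) × List Int :=
  (PySem.List.enumerate mvsas).foldl (fun st p =>
    (PySem.List.enumerate days).foldl (fun st q =>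
      let constraints := st.1 ++ [List.replicate (mvsas.length * museums.length * days.length) (0 : Int)]
      let constraint_b := st.2 ++ [(1 : Int)]
      -- constraints[len(constraints)-1][ix(...)] = 1 ; the index is non-negative, so .toNat is exact
      let constraints := (PySem.List.enumerate museums).foldl (fun cs r =>
        cs.set (cs.length - 1)
          ((cs.getD (cs.length - 1) []).set
            (ixF r.1 p.1 q.1 (mvsas.length : Int) (days.length : Int)).toNat 1)) constraints
      (constraints, constraint_b)) st) ([], [])

-- ===== PORT B =====
-- ([0]*i + [1] + [0]*(n-1-i)) * reps : Python list repetition is (List.replicate reps …).flatten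
def get_mvsa_one_shift_at_a_time_constraints_alt (museums : List Int) (mvsas : List Int) (days : List Int) :
    List (List Int) × List Int :=
  let n := mvsas.length * days.length
  let reps := museums.length
  let rows := (List.range n).map (fun i =>
    (List.replicate reps (List.replicate i (0 : Int) ++ [1] ++ List.replicate (n - 1 - i) 0)).flatten)
  (rows, List.replicate n 1)

-- ===== PRECONDITION & SPEC =====
def Spec_get_mvsa_one_shift_at_a_time_constraints (museums : List Int) (mvsas : List Int) (days : List Int) (out : List (List Int) × List Int) : Prop := out = get_mvsa_one_shift_at_a_time_constraints_alt museums mvsas days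
instance (museums : List Int) (mvsas : List Int) (days : List Int) (out : List (List Int) × List Int) : Decidable (Spec_get_mvsa_one_shift_at_a_time_constraints museums mvsas days out) := by unfold Spec_get_mvsa_one_shift_at_a_time_constraints; infer_instance

-- ===== CLAIM (what is proved, stated in full; the proofs are below) =====
def Claim_equal_get_mvsa_one_shift_at_a_time_constraints : Prop := ∀ (museums : List Int) (mvsas : List Int) (days : List Int), Dom_get_mvsa_one_shift_at_a_time_constraints museums mvsas days → Spec_get_mvsa_one_shift_at_a_time_constraints museums mvsas days (get_mvsa_one_shift_at_a_time_constraints museums mvsas days)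

-- ===== LEMMAS AND PROOFS =====

-- generic list helpers --------------------------------------------------------

theorem pv_getD_append_last {α : Type} [Inhabited α] (xs : List α) (y : α) (d : α) :
    (xs ++ [y]).getD xs.length d = y := by
  induction xs with
  | nil => rfl
  | cons a t ih => simpa using ih

theorem pv_set_append_last {α : Type} (xs : List α) (y z : α) :
    (xs ++ [y]).set xs.length z = xs ++ [z] := by
  induction xs with
  | nil => rfl
  | cons a t ih => simpa using ih

theorem pv_set_append_left {α : Type} (xs ys : List α) (i : Nat) (a : α) (h : i < xs.length) :
    (xs ++ ys).set i a = xs.set i a ++ ys := by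
  induction xs generalizing i with
  | nil => simp at h
  | cons b t ih =>
    cases i with
    | zero => simp
    | succ j => simp [List.set, ih j (by simpa using h)]

theorem pv_set_append_right {α : Type} (xs ys : List α) (i : Nat) (a : α) (h : xs.length ≤ i) :
    (xs ++ ys).set i a = xs ++ ys.set (i - xs.length) a := by
  induction xs generalizing i with
  | nil => simp
  | cons b t ih =>
    cases i with
    | zero => simp at h
    | succ j => simp [List.set, ih j (by simpa using h), Nat.succ_sub_succ]

-- fold-shape lemmas -----------------------------------------------------------

-- 'constraints[-1][…] = 1' loop: only the freshly appended last row is modified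
theorem pv_foldl_set_last {γ : Type} (g : List Int → γ → List Int) (l : List γ)
    (xs : List (List Int)) (y : List Int) :
    l.foldl (fun cs r => cs.set (cs.length - 1) (g (cs.getD (cs.length - 1) []) r)) (xs ++ [y])
      = xs ++ [l.foldl g y] := by
  induction l generalizing y with
  | nil => rfl
  | cons r t ih =>
    have hlen : (xs ++ [y]).length - 1 = xs.length := by simp
    simp only [List.foldl_cons, hlen, pv_getD_append_last, pv_set_append_last]
    exact ih (g y r)

-- inner day loop: append one row and one 1 per day
theorem pv_foldl_pair_one {γ : Type} (f : γ → List Int) (l : List γ)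
    (c : List (List Int)) (b : List Int) :
    l.foldl (fun st q => (st.1 ++ [f q], st.2 ++ [(1 : Int)])) (c, b)
      = (c ++ l.map f, b ++ List.replicate l.length 1) := by
  induction l generalizing c b with
  | nil => simp
  | cons q t ih =>
    simp only [List.foldl_cons, ih, List.map_cons, List.length_cons]
    simp [Prod.ext_iff, List.replicate_succ]

-- outer mvsa loop: append a block of rows and n ones per mvsa
theorem pv_foldl_pair_block {γ : Type} (f : γ → List (List Int)) (n : Nat) (l : List γ)
    (c : List (List Int)) (b : List Int) :
    l.foldl (fun st p => (st.1 ++ f p, st.2 ++ List.replicate n 1)) (c, b)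
      = (c ++ l.flatMap f, b ++ List.replicate (l.length * n) (1 : Int)) := by
  induction l generalizing c b with
  | nil => simp
  | cons p t ih =>
    simp only [List.foldl_cons, ih, List.flatMap_cons, List.length_cons]
    rw [show (t.length + 1) * n = n + t.length * n by ring, List.replicate_add]
    simp [Prod.ext_iff]

-- enumerate-to-range bridges (only the index component is used) ---------------

theorem pv_enum_flatMap {α β : Type} (g : Int → List β) :
    ∀ (xs : List α) (s : Int),
      (PySem.List.enumerate xs s).flatMap (fun p => g p.1)
        = (List.range xs.length).flatMap (fun (k : Nat) => g (s + (k : Int))) := by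
  intro xs
  induction xs with
  | nil => intro s; simp [PySem.List.enumerate_nil]
  | cons x t ih =>
    intro s
    rw [PySem.List.enumerate_cons, List.flatMap_cons, ih (s + 1), List.length_cons,
      List.range_succ_eq_map, List.flatMap_cons, List.flatMap_map]
    congr 1
    · norm_num
    · apply List.flatMap_congr
      intro k _
      congr 1
      push_cast
      ring

theorem pv_enum_map {α β : Type} (g : Int → β) :
    ∀ (xs : List α) (s : Int),
      (PySem.List.enumerate xs s).map (fun p => g p.1)
        = (List.range xs.length).map (fun (k : Nat) => g (s + (k : Int))) := by
  intro xs
  induction xs with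
  | nil => intro s; simp [PySem.List.enumerate_nil]
  | cons x t ih =>
    intro s
    rw [PySem.List.enumerate_cons, List.map_cons, ih (s + 1), List.length_cons,
      List.range_succ_eq_map, List.map_cons, List.map_map]
    congr 1
    · norm_num
    · apply List.map_congr_left
      intro k _
      simp only [Function.comp_apply]
      congr 1
      push_cast
      ring

theorem pv_enum_foldl {α σ : Type} (h : σ → Int → σ) :
    ∀ (xs : List α) (s : Int) (init : σ),
      (PySem.List.enumerate xs s).foldl (fun a p => h a p.1) init
        = (List.range xs.length).foldl (fun (a : σ) (k : Nat) => h a (s + (k : Int))) init := by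
  intro xs
  induction xs with
  | nil => intro s init; simp [PySem.List.enumerate_nil]
  | cons x t ih =>
    intro s init
    rw [PySem.List.enumerate_cons, List.foldl_cons, ih (s + 1), List.length_cons,
      List.range_succ_eq_map, List.foldl_cons, List.foldl_map]
    have hf : (fun (a : σ) (k : Nat) => h a (s + 1 + (k : Int)))
        = (fun a k => h a (s + ((Nat.succ k : Nat) : Int))) := by
      funext a k
      congr 1
      push_cast
      ring
    rw [hf]
    congr 1
    norm_num

-- A's per-row museum loop yields a tiled one-hot row ---------------------------

theorem pv_ix_lt (M V D v day m : Nat) (hv : v < V) (hd : day < D) (hm : m < M) :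
    day + D * (v + V * m) < M * (V * D) := by
  have h2 : 1 + v + V * m ≤ V * (m + 1) := by nlinarith
  have h3 : D * (1 + v + V * m) ≤ D * (V * (m + 1)) := Nat.mul_le_mul_left _ h2
  have h4 : D * (V * (m + 1)) ≤ D * (V * M) := by
    apply Nat.mul_le_mul_left
    apply Nat.mul_le_mul_left
    omega
  have h5 : D * (1 + v + V * m) = D + D * (v + V * m) := by ring
  have h6 : D * (V * M) = M * (V * D) := by ring
  omega

theorem pv_foldl_set_prefix {γ : Type} (f : γ → Nat) (a : Int) :
    ∀ (l : List γ) (xs ys : List Int), (∀ x ∈ l, f x < xs.length) →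
      l.foldl (fun row x => row.set (f x) a) (xs ++ ys)
        = (l.foldl (fun row x => row.set (f x) a) xs) ++ ys := by
  intro l
  induction l with
  | nil => intro xs ys _; rfl
  | cons x t ih =>
    intro xs ys hb
    simp only [List.foldl_cons]
    rw [pv_set_append_left _ _ _ _ (hb x (by simp))]
    exact ih _ _ (fun z hz => by rw [List.length_set]; exact hb z (by simp [hz]))

theorem pv_flatten_replicate_length {α : Type} (n : Nat) (l : List α) :
    (List.replicate n l).flatten.length = n * l.length := by
  induction n with
  | zero => simp
  | succ k ih =>
    rw [List.replicate_succ, List.flatten_cons, List.length_append, ih, Nat.succ_mul]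
    ring

theorem pv_key (V D v day : Nat) (hv : v < V) (hd : day < D) :
    ∀ (M : Nat),
      (List.range M).foldl (fun row m => row.set (day + D * (v + V * m)) (1 : Int))
          (List.replicate (M * (V * D)) 0)
        = (List.replicate M ((List.replicate (V * D) (0 : Int)).set (day + D * v) 1)).flatten := by
  intro M
  induction M with
  | zero => simp
  | succ n ih =>
    rw [List.range_succ, List.foldl_append,
      show (n + 1) * (V * D) = n * (V * D) + V * D by ring, List.replicate_add,
      pv_foldl_set_prefix _ _ _ _ _
        (by intro m hm
            simp only [List.length_replicate]
            exact pv_ix_lt n V D v day m hv hd (List.mem_range.mp hm)),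
      ih]
    simp only [List.foldl_cons, List.foldl_nil]
    have hlen : (List.replicate n ((List.replicate (V * D) (0 : Int)).set (day + D * v) 1)).flatten.length
        = n * (V * D) := by
      rw [pv_flatten_replicate_length]
      simp
    rw [pv_set_append_right _ _ _ _
        (by rw [hlen]
            have h5 : D * (v + V * n) = D * v + n * (V * D) := by ring
            omega),
      List.replicate_succ', List.flatten_append]
    simp only [List.flatten_cons, List.flatten_nil, List.append_nil]
    congr 2
    rw [hlen]
    have h5 : D * (v + V * n) = D * v + n * (V * D) := by ring
    omega

theorem pv_toNat_ix (V D v day m : Nat) :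
    (ixF (m : Int) (v : Int) (day : Int) (V : Int) (D : Int)).toNat
      = day + D * (v + V * m) := by
  unfold ixF
  rw [show ((day : Int) + (D : Int) * ((v : Int) + (V : Int) * (m : Int)))
      = ((day + D * (v + V * m) : Nat) : Int) by push_cast; ring]
  exact Int.toNat_natCast _

-- the row produced by A's museum loop, as M tiled copies of a one-hot block
theorem pv_row_eq (museums mvsas days : List Int) (v day : Nat)
    (hv : v < mvsas.length) (hd : day < days.length) :
    (List.range museums.length).foldl
        (fun (row : List Int) (m : Nat) => row.set (ixF (m : Int) (v : Int) (day : Int)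
          (mvsas.length : Int) (days.length : Int)).toNat 1)
        (List.replicate (mvsas.length * museums.length * days.length) (0 : Int))
      = (List.replicate museums.length
          ((List.replicate (mvsas.length * days.length) (0 : Int)).set (day + days.length * v) 1)).flatten := by
  have hfix : (fun (row : List Int) (m : Nat) => row.set (ixF (m : Int) (v : Int) (day : Int)
        (mvsas.length : Int) (days.length : Int)).toNat 1)
      = (fun (row : List Int) (m : Nat) => row.set (day + days.length * (v + mvsas.length * m)) 1) := by
    funext row m
    rw [pv_toNat_ix]
  rw [hfix,
    show mvsas.length * museums.length * days.length
      = museums.length * (mvsas.length * days.length) by ring,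
    pv_key mvsas.length days.length v day hv hd museums.length]

-- one-hot as concatenation of zero-runs
theorem pv_set_replicate (n i : Nat) (h : i < n) :
    (List.replicate n (0 : Int)).set i 1
      = List.replicate i (0 : Int) ++ [1] ++ List.replicate (n - 1 - i) 0 := by
  have hn : n = i + (1 + (n - 1 - i)) := by omega
  rw [hn, List.replicate_add,
    pv_set_append_right _ _ _ _ (by simp), List.length_replicate, Nat.sub_self,
    List.replicate_add, List.replicate_one, List.append_assoc,
    show i + (1 + (n - 1 - i)) - 1 - i = n - 1 - i from by omega]
  rfl

-- reshaping the doubly indexed row family into a single range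
theorem pv_range_mul {α : Type} (D : Nat) (g : Nat → α) :
    ∀ (V : Nat),
      (List.range V).flatMap (fun v => (List.range D).map (fun d => g (d + D * v)))
        = (List.range (V * D)).map g := by
  intro V
  induction V with
  | zero => simp
  | succ n ih =>
    rw [List.range_succ, List.flatMap_append, ih,
      show (n + 1) * D = n * D + D by ring, List.range_add, List.map_append, List.map_map]
    simp only [List.flatMap_cons, List.flatMap_nil, List.append_nil]
    congr 1
    apply List.map_congr_left
    intro d _
    simp only [Function.comp_apply]
    congr 1
    ring

-- A in canonical comprehension form
theorem pv_A_eq (museums mvsas days : List Int) :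
    get_mvsa_one_shift_at_a_time_constraints museums mvsas days
      = ((List.range mvsas.length).flatMap (fun (v : Nat) => (List.range days.length).map (fun (day : Nat) =>
          (List.range museums.length).foldl
            (fun (row : List Int) (m : Nat) => row.set (ixF (m : Int) (v : Int) (day : Int)
              (mvsas.length : Int) (days.length : Int)).toNat 1)
            (List.replicate (mvsas.length * museums.length * days.length) (0 : Int)))),
        List.replicate (mvsas.length * days.length) (1 : Int)) := by
  unfold get_mvsa_one_shift_at_a_time_constraints
  -- name A's per-row museum loop
  have hday : ∀ (vi : Int) (c : List (List Int)) (b : List Int),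
      (PySem.List.enumerate days).foldl (fun st q =>
        let constraints := st.1 ++ [List.replicate (mvsas.length * museums.length * days.length) (0 : Int)]
        let constraint_b := st.2 ++ [(1 : Int)]
        let constraints := (PySem.List.enumerate museums).foldl (fun cs r =>
          cs.set (cs.length - 1)
            ((cs.getD (cs.length - 1) []).set
              (ixF r.1 vi q.1 (mvsas.length : Int) (days.length : Int)).toNat 1)) constraints
        (constraints, constraint_b)) (c, b)
      = (c ++ (PySem.List.enumerate days).map (fun q =>
            (PySem.List.enumerate museums).foldl (fun row r =>
              row.set (ixF r.1 vi q.1 (mvsas.length : Int) (days.length : Int)).toNat 1)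
              (List.replicate (mvsas.length * museums.length * days.length) (0 : Int))),
         b ++ List.replicate (PySem.List.enumerate days).length (1 : Int)) := by
    intro vi c b
    have hbody : (fun (st : List (List Int) × List Int) (q : Int × Int) =>
        let constraints := st.1 ++ [List.replicate (mvsas.length * museums.length * days.length) (0 : Int)]
        let constraint_b := st.2 ++ [(1 : Int)]
        let constraints := (PySem.List.enumerate museums).foldl (fun cs r =>
          cs.set (cs.length - 1)
            ((cs.getD (cs.length - 1) []).set
              (ixF r.1 vi q.1 (mvsas.length : Int) (days.length : Int)).toNat 1)) constraints
        (constraints, constraint_b))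
        = (fun st q => (st.1 ++ [(PySem.List.enumerate museums).foldl (fun row r =>
              row.set (ixF r.1 vi q.1 (mvsas.length : Int) (days.length : Int)).toNat 1)
              (List.replicate (mvsas.length * museums.length * days.length) (0 : Int))],
            st.2 ++ [(1 : Int)])) := by
      funext st q
      dsimp only
      rw [pv_foldl_set_last (fun row r =>
        row.set (ixF r.1 vi q.1 (mvsas.length : Int) (days.length : Int)).toNat 1)
        (PySem.List.enumerate museums) st.1
        (List.replicate (mvsas.length * museums.length * days.length) (0 : Int))]
    rw [hbody, pv_foldl_pair_one, ← PySem.List.length_enumerate days 0]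
  have houter : (fun (st : List (List Int) × List Int) (p : Int × Int) =>
      (PySem.List.enumerate days).foldl (fun st q =>
        let constraints := st.1 ++ [List.replicate (mvsas.length * museums.length * days.length) (0 : Int)]
        let constraint_b := st.2 ++ [(1 : Int)]
        let constraints := (PySem.List.enumerate museums).foldl (fun cs r =>
          cs.set (cs.length - 1)
            ((cs.getD (cs.length - 1) []).set
              (ixF r.1 p.1 q.1 (mvsas.length : Int) (days.length : Int)).toNat 1)) constraints
        (constraints, constraint_b)) st)
      = (fun st p => (st.1 ++ (PySem.List.enumerate days).map (fun q =>
            (PySem.List.enumerate museums).foldl (fun row r =>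
              row.set (ixF r.1 p.1 q.1 (mvsas.length : Int) (days.length : Int)).toNat 1)
              (List.replicate (mvsas.length * museums.length * days.length) (0 : Int))),
          st.2 ++ List.replicate (PySem.List.enumerate days).length (1 : Int))) := by
    funext st p
    obtain ⟨c, b⟩ := st
    exact hday p.1 c b
  rw [houter, pv_foldl_pair_block]
  simp only [List.nil_append, PySem.List.length_enumerate]
  -- first component: enumerate → range, outermost
  rw [pv_enum_flatMap (fun vi => (PySem.List.enumerate days).map (fun q =>
      (PySem.List.enumerate museums).foldl (fun row r =>
        row.set (ixF r.1 vi q.1 (mvsas.length : Int) (days.length : Int)).toNat 1)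
        (List.replicate (mvsas.length * museums.length * days.length) (0 : Int)))) mvsas 0]
  simp only [Prod.mk.injEq]
  refine ⟨?_, by trivial⟩
  apply List.flatMap_congr
  intro v _
  rw [pv_enum_map (fun di =>
      (PySem.List.enumerate museums).foldl (fun row r =>
        row.set (ixF r.1 (0 + (v : Int)) di (mvsas.length : Int) (days.length : Int)).toNat 1)
        (List.replicate (mvsas.length * museums.length * days.length) (0 : Int))) days 0]
  apply List.map_congr_left
  intro day _
  have he := pv_enum_foldl (fun (row : List Int) (mi : Int) =>
      row.set (ixF mi (0 + (v : Int)) (0 + (day : Int)) (mvsas.length : Int) (days.length : Int)).toNat 1)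
      museums 0 (List.replicate (mvsas.length * museums.length * days.length) (0 : Int))
  refine he.trans ?_
  congr 1
  funext row k
  norm_num

-- ===== VERDICT (by name: the statement is the Claim_ definition above) =====
theorem get_mvsa_one_shift_at_a_time_constraints_spec : Claim_equal_get_mvsa_one_shift_at_a_time_constraints := by
  intro museums mvsas days _
  unfold Spec_get_mvsa_one_shift_at_a_time_constraints
  rw [pv_A_eq]
  unfold get_mvsa_one_shift_at_a_time_constraints_alt
  dsimp only
  simp only [Prod.mk.injEq]
  refine ⟨?_, by trivial⟩
  have hrows : (List.range mvsas.length).flatMap (fun (v : Nat) => (List.range days.length).map (fun (day : Nat) =>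
      (List.range museums.length).foldl
        (fun (row : List Int) (m : Nat) => row.set (ixF (m : Int) (v : Int) (day : Int)
          (mvsas.length : Int) (days.length : Int)).toNat 1)
        (List.replicate (mvsas.length * museums.length * days.length) (0 : Int))))
      = (List.range mvsas.length).flatMap (fun (v : Nat) => (List.range days.length).map (fun (day : Nat) =>
          (List.replicate museums.length
            ((List.replicate (mvsas.length * days.length) (0 : Int)).set (day + days.length * v) 1)).flatten)) := by
    apply List.flatMap_congr
    intro v hv
    apply List.map_congr_left
    intro day hday
    exact pv_row_eq museums mvsas days v day (List.mem_range.mp hv) (List.mem_range.mp hday)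
  rw [hrows,
    pv_range_mul days.length (fun i =>
      (List.replicate museums.length
        ((List.replicate (mvsas.length * days.length) (0 : Int)).set i 1)).flatten) mvsas.length]
  apply List.map_congr_left
  intro i hi
  rw [pv_set_replicate (mvsas.length * days.length) i (List.mem_range.mp hi)]
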